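-- pv_equiv track=rewrite | github.com/Shiv2157k/LeetCode2024 | may_redo/two_pointers/MinimumTimeToMakeRopeColorful.py | minimum_time_needed_v1
-- ===== SOURCE A (Python) =====
-- from typing import List
--
-- def minimum_time_needed_v1(colors: str, needed_time: List[int]) -> int:
--     """
--     Approach: Two Pointers Advanced
--     T: O(N)
--     S: O(1)
--     :param colors:
--     :param needed_time:
--     :return:
--     """
--
--     total_time = 0
--     curr_max_time = 0
--     for i in range(len(colors)):
--
--         if i > 0 and colors[i] != colors[i - 1]:
--             curr_max_time = 0
--
--         total_time += min(curr_max_time, needed_time[i])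
--         curr_max_time = max(curr_max_time, needed_time[i])
--     return total_time
-- ===== SOURCE B (Python) =====
-- def minimum_time_needed_v1(colors, needed_time):
--     # Run-length decomposition: scan each maximal run of equal colors with an
--     # inner loop, then add (sum of run) - (max of run, floored at 0).
--     total = 0
--     n = len(colors)
--     i = 0
--     while i < n:
--         j = i
--         s = 0
--         m = 0
--         while j < n and colors[j] == colors[i]:
--             t = needed_time[j]
--             s += t
--             if t > m:
--                 m = t
--             j += 1
--         total += s - m
--         i = j
--     return total
-- ===== Notes on version B (the rewrite author's own statement) =====
-- stated objective: alternative
-- what changed: B replaces A's single pass with a per-element min/max against a running max by a two-level run-length scan: an inner loop consumes each maximal run of equal colors accumulating its sum and max with plain comparisons, and the outer loop adds (sum - max) once per run.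
import Mathlib
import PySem

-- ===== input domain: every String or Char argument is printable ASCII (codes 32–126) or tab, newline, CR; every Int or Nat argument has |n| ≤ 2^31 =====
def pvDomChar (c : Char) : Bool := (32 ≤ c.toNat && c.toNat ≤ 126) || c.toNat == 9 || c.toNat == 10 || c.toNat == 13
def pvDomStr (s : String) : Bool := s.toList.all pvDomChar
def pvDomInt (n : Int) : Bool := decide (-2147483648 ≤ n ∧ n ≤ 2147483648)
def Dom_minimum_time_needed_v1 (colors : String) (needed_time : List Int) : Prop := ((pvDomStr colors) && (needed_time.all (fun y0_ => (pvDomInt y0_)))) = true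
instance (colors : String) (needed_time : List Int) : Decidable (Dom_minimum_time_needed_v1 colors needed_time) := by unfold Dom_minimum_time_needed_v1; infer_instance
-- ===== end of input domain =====

-- B scans each maximal run of equal colors with an inner loop (sum and max per run) instead of A's single pass with a per-element min; alternative decomposition, same cost.

-- ===== PORT A =====
-- one step of A's loop body for index i; needed_time[i] is in range on Pre_ (else Python raises IndexError)
def pvStepA (cs : List Char) (ts : List Int) (st : Int × Int) (i : Nat) : Int × Int :=
  let currMax := if i > 0 ∧ cs.getD i ' ' ≠ cs.getD (i - 1) ' ' then 0 else st.2
  let t := PySem.List.pyGetD ts (i : Int) 0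
  (st.1 + min currMax t, max currMax t)

def minimum_time_needed_v1 (colors : String) (needed_time : List Int) : Int :=
  let cs := colors.toList
  ((List.range cs.length).foldl (pvStepA cs needed_time) (0, 0)).1

-- ===== PORT B =====
-- inner while loop of B: consume the run of color c from index j, accumulating sum s and max m
-- (fuel = cs.length - j makes the while loop structurally total; it never runs out)
def pvRun (cs : List Char) (ts : List Int) (c : Char) : Nat → Nat → Int → Int → Nat × Int × Int
  | 0, j, s, m => (j, s, m)
  | fuel + 1, j, s, m =>
    if j < cs.length ∧ cs.getD j ' ' = c then
      let t := PySem.List.pyGetD ts (j : Int) 0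
      pvRun cs ts c fuel (j + 1) (s + t) (if t > m then t else m)
    else (j, s, m)

-- outer while loop of B (fuel = cs.length - i, likewise never exhausted)
def pvOuter (cs : List Char) (ts : List Int) : Nat → Nat → Int → Int
  | 0, _, total => total
  | fuel + 1, i, total =>
    if i < cs.length then
      let r := pvRun cs ts (cs.getD i ' ') (cs.length - i) i 0 0
      pvOuter cs ts fuel r.1 (total + r.2.1 - r.2.2)
    else total

def minimum_time_needed_v1_alt (colors : String) (needed_time : List Int) : Int :=
  pvOuter colors.toList needed_time colors.toList.length 0 0

-- ===== PRECONDITION & SPEC =====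
-- Pre_: Python A raises IndexError exactly when needed_time is shorter than colors.
def Pre_minimum_time_needed_v1 (colors : String) (needed_time : List Int) : Prop :=
  colors.toList.length ≤ needed_time.length
instance (colors : String) (needed_time : List Int) : Decidable (Pre_minimum_time_needed_v1 colors needed_time) := by unfold Pre_minimum_time_needed_v1; infer_instance
def pvWitness_minimum_time_needed_v1 : String × List Int := ("aab", [1, 2, 3])

def Spec_minimum_time_needed_v1 (colors : String) (needed_time : List Int) (out : Int) : Prop := out = minimum_time_needed_v1_alt colors needed_time
instance (colors : String) (needed_time : List Int) (out : Int) : Decidable (Spec_minimum_time_needed_v1 colors needed_time out) := by unfold Spec_minimum_time_needed_v1; infer_instance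

-- ===== CLAIM (what is proved, stated in full; the proofs are below) =====
def Claim_equal_minimum_time_needed_v1 : Prop := ∀ (colors : String) (needed_time : List Int), Dom_minimum_time_needed_v1 colors needed_time → Pre_minimum_time_needed_v1 colors needed_time → Spec_minimum_time_needed_v1 colors needed_time (minimum_time_needed_v1 colors needed_time)

-- ===== LEMMAS AND PROOFS =====

theorem pvRun_ge (cs : List Char) (ts : List Int) (c : Char) (fuel j : Nat) (s m : Int) :
    j ≤ (pvRun cs ts c fuel j s m).1 := by
  induction fuel generalizing j s m with
  | zero => exact le_refl j
  | succ fuel ih =>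
    rw [pvRun]
    split
    · exact le_trans (Nat.le_succ j) (ih (j + 1) _ _)
    · exact le_refl j

-- A's fold across one run of color c reduces to A's fold restarted (currMax = 0) at the run's end,
-- with the run's contribution s - m committed; invariant: tot = base + s - m and A's currMax = m.
theorem pvRunA (cs : List Char) (ts : List Int) (c : Char) (fuel j : Nat) (s m tot base : Int)
    (hfuel : fuel = cs.length - j)
    (hinv : tot = base + s - m)
    (hb : m = 0 ∨ (0 < j ∧ cs.getD (j - 1) ' ' = c)) :
    ((List.range' j (cs.length - j)).foldl (pvStepA cs ts) (tot, m)).1 =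
    ((List.range' (pvRun cs ts c fuel j s m).1 (cs.length - (pvRun cs ts c fuel j s m).1)).foldl
      (pvStepA cs ts) (base + (pvRun cs ts c fuel j s m).2.1 - (pvRun cs ts c fuel j s m).2.2, 0)).1 := by
  induction fuel generalizing j s m tot with
  | zero =>
    have h0 : cs.length - j = 0 := hfuel.symm
    simp [pvRun, h0, hinv]
  | succ fuel ih =>
    rw [pvRun]
    by_cases hc : j < cs.length ∧ cs.getD j ' ' = c
    · simp only [if_pos hc]
      obtain ⟨hj, hcj⟩ := hc
      -- unfold one step of A's fold
      have hr : cs.length - j = (cs.length - (j + 1)) + 1 := by omega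
      rw [hr, List.range'_succ, List.foldl_cons]
      have hstep : pvStepA cs ts (tot, m) j =
          (tot + min m (PySem.List.pyGetD ts (j : Int) 0), max m (PySem.List.pyGetD ts (j : Int) 0)) := by
        unfold pvStepA
        have hcm : (if j > 0 ∧ cs.getD j ' ' ≠ cs.getD (j - 1) ' ' then 0 else m) = m := by
          rcases hb with hb | ⟨hj0, hprev⟩
          · subst hb; split <;> rfl
          · rw [if_neg]; push_neg; intro _; rw [hcj, hprev]
        simp only [hcm]
      rw [hstep]
      have hmax : max m (PySem.List.pyGetD ts (j : Int) 0) =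
          (if PySem.List.pyGetD ts (j : Int) 0 > m then PySem.List.pyGetD ts (j : Int) 0 else m) := by
        split_ifs with h <;> omega
      rw [hmax]
      exact ih (j + 1) (s + PySem.List.pyGetD ts (j : Int) 0) _ _
        (by omega)
        (by split_ifs with h <;> omega)
        (Or.inr ⟨Nat.succ_pos j, by simpa using hcj⟩)
    · simp only [if_neg hc]
      by_cases hj : j < cs.length
      · -- j < n, cs[j] ≠ c: A's step at j resets currMax (or m = 0), so both folds take the same step
        have hr : cs.length - j = (cs.length - (j + 1)) + 1 := by omega
        rw [hr, List.range'_succ, List.foldl_cons, List.foldl_cons]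
        have hne : cs.getD j ' ' ≠ c := fun h => hc ⟨hj, h⟩
        have hstep : pvStepA cs ts (tot, m) j = pvStepA cs ts (base + s - m, 0) j := by
          unfold pvStepA
          rcases hb with hb | ⟨hj0, hprev⟩
          · subst hb; simp [hinv]
          · split_ifs with h
            · simp [hinv]
            · push_neg at h
              have := h hj0
              rw [hprev] at this
              exact absurd this hne
        rw [hstep]
      · have h0 : cs.length - j = 0 := by omega
        simp [h0, hinv]

-- A's fold from a fresh boundary state (tot, 0) over [i, n) equals B's outer loop from (i, tot)
theorem pvMainA (cs : List Char) (ts : List Int) (fuel i : Nat) (tot : Int)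
    (hfuel : cs.length - i ≤ fuel) :
    ((List.range' i (cs.length - i)).foldl (pvStepA cs ts) (tot, 0)).1 = pvOuter cs ts fuel i tot := by
  induction fuel generalizing i tot with
  | zero =>
    have h0 : cs.length - i = 0 := by omega
    simp [pvOuter, h0]
  | succ fuel ih =>
    rw [pvOuter]
    by_cases hi : i < cs.length
    · simp only [if_pos hi]
      rw [pvRunA cs ts (cs.getD i ' ') (cs.length - i) i 0 0 tot tot rfl (by ring) (Or.inl rfl)]
      have hge : i < (pvRun cs ts (cs.getD i ' ') (cs.length - i) i 0 0).1 := by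
        have hr : cs.length - i = (cs.length - (i + 1)) + 1 := by omega
        rw [hr, pvRun]
        split
        · exact lt_of_lt_of_le (Nat.lt_succ_self i) (pvRun_ge cs ts _ _ _ _ _)
        · next h => exact absurd ⟨hi, rfl⟩ h
      exact ih _ _ (by omega)
    · have h0 : cs.length - i = 0 := by omega
      simp [h0, if_neg hi]

-- ===== VERDICT (by name: the statement is the Claim_ definition above) =====
theorem minimum_time_needed_v1_spec : Claim_equal_minimum_time_needed_v1 := by
  intro colors needed_time _ _
  unfold Spec_minimum_time_needed_v1 minimum_time_needed_v1 minimum_time_needed_v1_alt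
  dsimp only
  have := pvMainA colors.toList needed_time colors.toList.length 0 0 (by omega)
  simpa [List.range_eq_range'] using this
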